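-- pv_equiv track=rewrite | github.com/PhoneticsBug/Code-Workouts | workouts/Algorithm/august/week4/12927. 야근 지수/12927.py | solution
-- ===== SOURCE A (Python) =====
-- def solution(n, works):
--     answer = 0
--     while n > 0 and max(works) > 0: # 시간이 남아있는 동안, 마이너스가 되지 않게 하기
--         max_idx = works.index(max(works))
--         works[max_idx] -= 1
--         n -= 1
--
--     answer = sum(i**2 for i in works)
--     return answer
-- ===== SOURCE B (Python) =====
-- def solution(n, works):
--     # Water-level algorithm: binary-search the level L so that trimming every
--     # element down to L uses at most m = min(n, total positive work) units,
--     # then account for the r leftover units by dropping r elements to L-1.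
--     total_pos = sum(w for w in works if w > 0)
--     m = min(n, total_pos)
--     if m <= 0:
--         return sum(w * w for w in works)
--     lo, hi = 0, max(works)
--     while lo < hi:
--         mid = (lo + hi) // 2
--         if sum(w - mid for w in works if w > mid) <= m:
--             hi = mid
--         else:
--             lo = mid + 1
--     L = lo
--     r = m - sum(w - L for w in works if w > L)
--     cnt = sum(1 for w in works if w >= L)
--     return (sum(w * w for w in works if w < L)
--             + (cnt - r) * L * L + r * (L - 1) * (L - 1))
-- ===== Notes on version B (the rewrite author's own statement) =====
-- stated objective: faster
-- what changed: A simulates the reduction one unit at a time, rescanning the list for max and index each step; B binary-searches the final water level L with a cost function, then computes the sum of squares from counts in closed form.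
import Mathlib
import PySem

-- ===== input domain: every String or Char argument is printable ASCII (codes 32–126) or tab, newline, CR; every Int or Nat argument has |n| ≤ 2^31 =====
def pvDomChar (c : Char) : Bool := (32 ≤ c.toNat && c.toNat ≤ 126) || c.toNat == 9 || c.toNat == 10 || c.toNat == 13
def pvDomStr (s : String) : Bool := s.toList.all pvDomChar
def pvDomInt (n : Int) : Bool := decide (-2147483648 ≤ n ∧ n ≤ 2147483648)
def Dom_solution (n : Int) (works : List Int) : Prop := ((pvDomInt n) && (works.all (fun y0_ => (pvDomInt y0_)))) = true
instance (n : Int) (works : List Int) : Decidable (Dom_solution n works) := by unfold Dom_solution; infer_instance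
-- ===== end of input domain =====

-- B replaces A's one-unit-at-a-time simulation by a binary search for the final
-- water level, computing the answer from counts in closed form (faster; note: A
-- mutates `works` in place, B does not — the equivalence proved is about the
-- return value only).

-- ===== PORT A =====
def sumSqA (works : List Int) : Int := works.foldl (fun s i => s + i ^ 2) 0

-- the while loop; it decrements n by exactly 1 per pass, so it runs at most
-- n.toNat times — that count is the structural fuel
def solLoopA : Nat → List Int → List Int
  | 0, works => works
  | Nat.succ k, works =>
    match PySem.List.max? works (fun y => y) with
    | none => works   -- Python raises ValueError here (max of empty list); excluded by Pre_
    | some mx =>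
      if 0 < mx then
        solLoopA k (works.modify ((PySem.List.index? works mx).getD 0) (· - 1))
      else works

def solution (n : Int) (works : List Int) : Int := sumSqA (solLoopA n.toNat works)

-- ===== PORT B =====
def posSumB (works : List Int) : Int :=
  works.foldl (fun s w => s + (if 0 < w then w else 0)) 0

def sumSqB (works : List Int) : Int :=
  works.foldl (fun s w => s + w * w) 0

def costB (works : List Int) (level : Int) : Int :=
  works.foldl (fun s w => s + (if level < w then w - level else 0)) 0

def cntGeB (works : List Int) (level : Int) : Int :=
  works.foldl (fun s w => s + (if level ≤ w then 1 else 0)) 0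

def sumSqBelowB (works : List Int) (level : Int) : Int :=
  works.foldl (fun s w => s + (if w < level then w * w else 0)) 0

-- the 'while lo < hi' loop; the bracket [lo, hi] shrinks each pass, so
-- (hi - lo).toNat passes suffice — that count is the structural fuel
def bsGo (works : List Int) (m : Int) : Nat → Int → Int → Int
  | 0, lo, _ => lo
  | Nat.succ k, lo, hi =>
    if lo < hi then
      if costB works (PySem.Int.floordiv (lo + hi) 2) ≤ m then
        bsGo works m k lo (PySem.Int.floordiv (lo + hi) 2)
      else bsGo works m k (PySem.Int.floordiv (lo + hi) 2 + 1) hi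
    else lo

def bsearchB (works : List Int) (m lo hi : Int) : Int := bsGo works m (hi - lo).toNat lo hi

def solution_alt (n : Int) (works : List Int) : Int :=
  let totalPos := posSumB works
  let m := min n totalPos
  if m ≤ 0 then sumSqB works
  else
    match PySem.List.max? works (fun y => y) with
    | none => 0   -- unreachable: m > 0 forces a positive element, so works ≠ []
    | some hiMax =>
      let level := bsearchB works m 0 hiMax
      let r := m - costB works level
      let cnt := cntGeB works level
      sumSqBelowB works level + (cnt - r) * level * level + r * (level - 1) * (level - 1)

-- ===== PRECONDITION & SPEC =====
-- Pre_ excludes only empty `works` with n > 0, where A raises ValueError (max of empty sequence).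
def Pre_solution (n : Int) (works : List Int) : Prop := works = [] → n ≤ 0
instance (n : Int) (works : List Int) : Decidable (Pre_solution n works) := by
  unfold Pre_solution; infer_instance

def pvWitness_solution : Int × List Int := (2, [3, 1])

def Spec_solution (n : Int) (works : List Int) (out : Int) : Prop := out = solution_alt n works
instance (n : Int) (works : List Int) (out : Int) : Decidable (Spec_solution n works out) := by
  unfold Spec_solution; infer_instance

-- ===== CLAIM (what is proved, stated in full; the proofs are below) =====
def Claim_equal_solution : Prop := ∀ (n : Int) (works : List Int), Dom_solution n works → Pre_solution n works → Spec_solution n works (solution n works)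

-- ===== LEMMAS AND PROOFS =====

-- msum f w = the Python generator-expression sum  'sum(f(x) for x in w)'
def msum (f : Int → Int) (w : List Int) : Int := (w.map f).sum

theorem msum_nil (f : Int → Int) : msum f [] = 0 := rfl

theorem msum_cons (f : Int → Int) (x : Int) (w : List Int) :
    msum f (x :: w) = f x + msum f w := by simp [msum]

theorem foldl_eq_msum (f : Int → Int) (w : List Int) :
    w.foldl (fun s x => s + f x) 0 = msum f w := by
  simpa [msum] using PySem.List.foldl_add w f 0

theorem msum_nonneg {f : Int → Int} (hf : ∀ x, 0 ≤ f x) (w : List Int) : 0 ≤ msum f w := by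
  induction w with
  | nil => simp [msum_nil]
  | cons x t ih => rw [msum_cons]; have := hf x; omega

theorem msum_le_of_mem {f : Int → Int} (hf : ∀ x, 0 ≤ f x) {w : List Int} {x : Int}
    (hx : x ∈ w) : f x ≤ msum f w := by
  induction w with
  | nil => cases hx
  | cons y t ih =>
    rw [msum_cons]
    rcases List.mem_cons.1 hx with h | h
    · subst h; have := msum_nonneg hf t; omega
    · have := ih h; have := hf y; omega

theorem msum_congr_mem {f g : Int → Int} {w : List Int} (h : ∀ x ∈ w, f x = g x) :
    msum f w = msum g w := by
  induction w with
  | nil => rfl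
  | cons y t ih =>
    rw [msum_cons, msum_cons, h y (by simp), ih (fun x hx => h x (by simp [hx]))]

theorem msum_add (f g : Int → Int) (w : List Int) :
    msum (fun x => f x + g x) w = msum f w + msum g w := by
  induction w with
  | nil => rfl
  | cons y t ih => rw [msum_cons, msum_cons, msum_cons, ih]; ring

theorem msum_mul_right (f : Int → Int) (c : Int) (w : List Int) :
    msum (fun x => f x * c) w = msum f w * c := by
  induction w with
  | nil => simp [msum_nil]
  | cons y t ih => rw [msum_cons, msum_cons, ih]; ring

theorem msum_modify (f g : Int → Int) (w : List Int) (i : Nat) (hi : i < w.length) :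
    msum f (w.modify i g) = msum f w - f w[i] + f (g w[i]) := by
  induction w generalizing i with
  | nil => simp at hi
  | cons y t ih =>
    cases i with
    | zero => simp [List.modify, msum_cons]; ring
    | succ j =>
      have hj : j < t.length := by simpa using hi
      rw [show (y :: t).modify (j + 1) g = y :: t.modify j g from rfl, msum_cons, msum_cons,
        ih j hj]
      simp only [List.getElem_cons_succ]
      ring

-- bridge: each port helper IS an msum
theorem costB_eq (w : List Int) (L : Int) :
    costB w L = msum (fun x => if L < x then x - L else 0) w := foldl_eq_msum _ w
theorem cntGeB_eq (w : List Int) (L : Int) :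
    cntGeB w L = msum (fun x => if L ≤ x then 1 else 0) w := foldl_eq_msum _ w
theorem sumSqBelowB_eq (w : List Int) (L : Int) :
    sumSqBelowB w L = msum (fun x => if x < L then x * x else 0) w := foldl_eq_msum _ w
theorem sumSqB_eq (w : List Int) : sumSqB w = msum (fun x => x * x) w := foldl_eq_msum _ w
theorem posSumB_eq (w : List Int) :
    posSumB w = msum (fun x => if 0 < x then x else 0) w := foldl_eq_msum _ w
theorem msum_zero (w : List Int) : msum (fun _ => 0) w = 0 := by simp [msum]
theorem posSumB_eq_cost0 (w : List Int) : posSumB w = costB w 0 := by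
  rw [posSumB_eq, costB_eq]
  exact msum_congr_mem (fun x _ => by split_ifs <;> omega)
theorem sumSqA_eq_sumSqB (w : List Int) : sumSqA w = sumSqB w := by
  rw [show sumSqA w = msum (fun i => i ^ 2) w from foldl_eq_msum _ w, sumSqB_eq]
  exact msum_congr_mem (fun x _ => by ring)

theorem cost_nonneg (w : List Int) (L : Int) : 0 ≤ costB w L := by
  rw [costB_eq]; exact msum_nonneg (fun x => by split_ifs <;> omega) w

theorem cost_antitone (w : List Int) {L L' : Int} (h : L ≤ L') : costB w L' ≤ costB w L := by
  rw [costB_eq, costB_eq]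
  induction w with
  | nil => simp [msum_nil]
  | cons y t ih => rw [msum_cons, msum_cons]; have : (if L' < y then y - L' else 0) ≤ (if L < y then y - L else 0) := by split_ifs <;> omega
                   omega

theorem cost_le_zero {w : List Int} {L : Int} (h : costB w L ≤ 0) : ∀ x ∈ w, x ≤ L := by
  intro x hx
  by_contra hc
  have h1 : (if L < x then x - L else 0) ≤ costB w L := by
    rw [costB_eq]; exact msum_le_of_mem (fun y => by split_ifs <;> omega) hx
  rw [if_pos (by omega)] at h1; omega

theorem cost_eq_zero_of_le {w : List Int} {L : Int} (h : ∀ x ∈ w, x ≤ L) : costB w L = 0 := by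
  rw [costB_eq]
  rw [msum_congr_mem (g := fun _ => 0) (fun x hx => by rw [if_neg (by have := h x hx; omega)])]
  exact msum_zero w

-- the abstract water level: least L ≥ 0 whose trimming cost is ≤ m
def isLev (w : List Int) (m L : Int) : Prop :=
  0 ≤ L ∧ costB w L ≤ m ∧ (0 < L → m < costB w (L - 1))

-- the closed-form value B computes from a level L
def valB (w : List Int) (m L : Int) : Int :=
  sumSqBelowB w L + (cntGeB w L - (m - costB w L)) * L * L +
    (m - costB w L) * (L - 1) * (L - 1)

theorem isLev_unique {w : List Int} {m L L' : Int} (h1 : isLev w m L) (h2 : isLev w m L') :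
    L = L' := by
  obtain ⟨a1, b1, c1⟩ := h1
  obtain ⟨a2, b2, c2⟩ := h2
  by_contra hne
  rcases lt_trichotomy L L' with h | h | h
  · have := c2 (by omega)
    have := cost_antitone w (show L ≤ L' - 1 by omega)
    omega
  · exact hne h
  · have := c1 (by omega)
    have := cost_antitone w (show L' ≤ L - 1 by omega)
    omega

theorem isLev_le_max {w : List Int} {m L mx : Int} (hm : 0 ≤ m) (h0 : 0 ≤ mx)
    (hmax : ∀ x ∈ w, x ≤ mx) (h : isLev w m L) : L ≤ mx := by
  by_contra hc
  have h1 := h.2.2 (by omega)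
  have h2 : costB w (L - 1) = 0 :=
    cost_eq_zero_of_le (fun x hx => by have := hmax x hx; omega)
  omega

theorem bsGo_spec (w : List Int) (m : Int) : ∀ (k : Nat) (lo hi : Int),
    (hi - lo).toNat ≤ k → 0 ≤ lo → lo ≤ hi → costB w hi ≤ m →
    (0 < lo → m < costB w (lo - 1)) → isLev w m (bsGo w m k lo hi) := by
  intro k
  induction k with
  | zero =>
    intro lo hi hk h0 hlh hhi hlo
    have : lo = hi := by omega
    subst this
    exact ⟨h0, hhi, hlo⟩
  | succ k ih =>
    intro lo hi hk h0 hlh hhi hlo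
    rw [bsGo]
    split
    · rename_i h
      have hmid1 := (PySem.Int.floordiv_two_mid_bounds (le_of_lt h)).1
      have hmid2 := (PySem.Int.floordiv_lt_iff_lt_mul (a := lo + hi) (q := hi)
        (by norm_num : (0:Int) < 2)).2 (by omega)
      set mid := PySem.Int.floordiv (lo + hi) 2 with hmd
      split
      · rename_i hc
        exact ih lo mid (by omega) h0 (by omega) hc hlo
      · rename_i hc
        exact ih (mid + 1) hi (by omega) (by omega) (by omega) hhi
          (fun _ => by simpa using (by omega : m < costB w mid))
    · rename_i h
      have : lo = hi := by omega
      subst this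
      exact ⟨h0, hhi, hlo⟩

theorem bsearch_spec (w : List Int) (m : Int) (lo hi : Int) (h0 : 0 ≤ lo) (hlh : lo ≤ hi)
    (hhi : costB w hi ≤ m) (hlo : 0 < lo → m < costB w (lo - 1)) :
    isLev w m (bsearchB w m lo hi) :=
  bsGo_spec w m (hi - lo).toNat lo hi le_rfl h0 hlh hhi hlo

theorem val_zero {w : List Int} {L : Int} (h : costB w L ≤ 0) : valB w 0 L = sumSqB w := by
  have hz : costB w L = 0 := le_antisymm h (cost_nonneg w L)
  have hle := cost_le_zero h
  unfold valB
  rw [hz, sumSqB_eq, sumSqBelowB_eq, cntGeB_eq]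
  have key : msum (fun x => x * x) w =
      msum (fun x => (if x < L then x * x else 0) + (if L ≤ x then 1 else 0) * (L * L)) w := by
    refine msum_congr_mem (fun x hx => ?_)
    have := hle x hx
    rcases lt_or_eq_of_le this with h' | h'
    · rw [if_pos h', if_neg (by omega)]; ring
    · subst h'; rw [if_neg (by omega), if_pos le_rfl]; ring
  rw [key, msum_add]
  rw [show (fun x => (if L ≤ x then (1:Int) else 0) * (L * L)) = (fun x => (if L ≤ x then (1:Int) else 0) * (L * L)) from rfl]
  rw [msum_mul_right (fun x => if L ≤ x then (1:Int) else 0) (L * L) w]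
  ring

-- one unit removed from a maximal element keeps the level and the value
theorem step_lemma {w : List Int} {m mx L : Int} {idx : Nat} (hidx : idx < w.length)
    (hval : w[idx] = mx) (hmx : 0 < mx) (hmax : ∀ x ∈ w, x ≤ mx) (hm : 1 ≤ m)
    (hL : isLev w m L) :
    isLev (w.modify idx (· - 1)) (m - 1) L ∧
      valB (w.modify idx (· - 1)) (m - 1) L = valB w m L := by
  have hLle : L ≤ mx := isLev_le_max (by omega) (by omega) hmax hL
  obtain ⟨hL0, hLc, hLmin⟩ := hL
  have hc : ∀ X : Int, costB (w.modify idx (· - 1)) X = costB w X - (if X < mx then 1 else 0) := by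
    intro X
    rw [costB_eq, costB_eq, msum_modify _ _ w idx hidx, hval]
    split_ifs <;> omega
  have hcnt : ∀ X : Int, cntGeB (w.modify idx (· - 1)) X = cntGeB w X - (if X = mx then 1 else 0) := by
    intro X
    rw [cntGeB_eq, cntGeB_eq, msum_modify _ _ w idx hidx, hval]
    split_ifs <;> omega
  have hsb : ∀ X : Int, sumSqBelowB (w.modify idx (· - 1)) X =
      sumSqBelowB w X - (if mx < X then mx * mx else 0) + (if mx - 1 < X then (mx - 1) * (mx - 1) else 0) := by
    intro X
    rw [sumSqBelowB_eq, sumSqBelowB_eq, msum_modify _ _ w idx hidx, hval]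
  have hcostmx : costB w mx = 0 := cost_eq_zero_of_le hmax
  constructor
  · refine ⟨hL0, ?_, ?_⟩
    · rw [hc]
      rcases lt_or_eq_of_le hLle with h' | h'
      · rw [if_pos h']; omega
      · subst h'; rw [if_neg (by omega)]; omega
    · intro hpos
      have := hLmin hpos
      rw [hc, if_pos (by omega)]
      omega
  · unfold valB
    rw [hc, hcnt, hsb]
    rcases lt_or_eq_of_le hLle with hcase | hcase
    · split_ifs <;> first | (exfalso; omega) | ring
    · subst hcase
      split_ifs <;> first | (exfalso; omega) | ring

theorem pos_mem_of_posSum_pos {w : List Int} (h : 0 < posSumB w) : ∃ x ∈ w, 0 < x := by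
  by_contra hc
  have hall : ∀ x ∈ w, x ≤ 0 := fun x hx => by
    by_contra hp; exact hc ⟨x, hx, by omega⟩
  rw [posSumB_eq_cost0, cost_eq_zero_of_le hall] at h
  omega

theorem alt_def (n : Int) (w : List Int) : solution_alt n w =
    if min n (posSumB w) ≤ 0 then sumSqB w
    else match PySem.List.max? w (fun y => y) with
      | none => 0
      | some hiMax =>
        valB w (min n (posSumB w)) (bsearchB w (min n (posSumB w)) 0 hiMax) := rfl

theorem alt_base (n : Int) (w : List Int) (h : min n (posSumB w) ≤ 0) :
    solution_alt n w = sumSqB w := by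
  rw [alt_def, if_pos h]

theorem alt_main {n m L : Int} {w : List Int} (hm : 0 < m) (hmeq : m = min n (posSumB w))
    (hL : isLev w m L) : solution_alt n w = valB w m L := by
  have hpos : 0 < posSumB w := by omega
  obtain ⟨x, hxw, hx⟩ := pos_mem_of_posSum_pos hpos
  have hne : w ≠ [] := by rintro rfl; cases hxw
  obtain ⟨mx, hmx⟩ : ∃ mx, PySem.List.max? w (fun y => y) = some mx := by
    cases h : PySem.List.max? w (fun y => y) with
    | none => exact absurd ((PySem.List.max?_eq_none_iff w _).1 h) hne
    | some mx => exact ⟨mx, rfl⟩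
  have hmax : ∀ y ∈ w, y ≤ mx := PySem.List.max?_isMax hmx
  have hmxpos : 0 < mx := lt_of_lt_of_le hx (hmax x hxw)
  have hbs : isLev w m (bsearchB w m 0 mx) :=
    bsearch_spec w m 0 mx le_rfl (by omega) (by rw [cost_eq_zero_of_le hmax]; omega)
      (fun h => absurd h (by omega))
  have hLL : bsearchB w m 0 mx = L := isLev_unique hbs hL
  rw [alt_def, ← hmeq, if_neg (by omega), hmx]
  dsimp only
  rw [hLL]

theorem alt_step {n mx : Int} {w : List Int} {idx : Nat} (hn : 0 < n)
    (hmx? : PySem.List.max? w (fun y => y) = some mx) (hmx : 0 < mx)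
    (hidx? : PySem.List.index? w mx = some idx) :
    solution_alt n w = solution_alt (n - 1) (w.modify idx (· - 1)) := by
  obtain ⟨hidx, hval, -⟩ := PySem.List.getElem_of_index?_eq_some hidx?
  have hmax : ∀ y ∈ w, y ≤ mx := PySem.List.max?_isMax hmx?
  have hmem : mx ∈ w := PySem.List.max?_mem hmx?
  have hPge : mx ≤ posSumB w := by
    rw [posSumB_eq_cost0, costB_eq]
    have h2 := msum_le_of_mem (f := fun x => if (0:Int) < x then x - 0 else 0)
      (fun y => by dsimp only; split_ifs <;> omega) hmem
    simp only [if_pos hmx] at h2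
    omega
  set m := min n (posSumB w) with hmdef
  have hm1 : 1 ≤ m := by omega
  have hbs : isLev w m (bsearchB w m 0 mx) :=
    bsearch_spec w m 0 mx le_rfl (by omega) (by rw [cost_eq_zero_of_le hmax]; omega)
      (fun h => absurd h (by omega))
  set L := bsearchB w m 0 mx with hLdef
  have hA : solution_alt n w = valB w m L := alt_main (by omega) hmdef hbs
  obtain ⟨hlev', hval'⟩ := step_lemma hidx hval hmx hmax hm1 hbs
  have hP' : posSumB (w.modify idx (· - 1)) = posSumB w - 1 := by
    rw [posSumB_eq_cost0, posSumB_eq_cost0, costB_eq, costB_eq,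
      msum_modify _ _ w idx hidx, hval]
    rw [if_pos (by omega : (0:Int) < mx)]
    split_ifs <;> omega
  have hm' : min (n - 1) (posSumB (w.modify idx (· - 1))) = m - 1 := by
    rw [hP']; omega
  rcases lt_or_eq_of_le hm1 with h2 | h1
  · -- m ≥ 2 : recursive case stays in the main branch
    have := alt_main (n := n - 1) (w := w.modify idx (· - 1)) (m := m - 1) (L := L)
      (by omega) (by omega) hlev'
    rw [hA, this, hval']
  · -- m = 1 : the reduced problem takes the early return
    have hb : solution_alt (n - 1) (w.modify idx (· - 1)) = sumSqB (w.modify idx (· - 1)) :=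
      alt_base _ _ (by omega)
    have hv : valB (w.modify idx (· - 1)) 0 L = sumSqB (w.modify idx (· - 1)) :=
      val_zero (by have := hlev'.2.1; omega)
    rw [hA, hb, ← hv, ← hval', ← h1]
    norm_num

theorem loop_eq : ∀ (k : Nat) (n : Int) (w : List Int), n.toNat = k → (w = [] → n ≤ 0) →
    sumSqA (solLoopA k w) = solution_alt n w := by
  intro k
  induction k with
  | zero =>
    intro n w hk hpre
    rw [show solLoopA 0 w = w from rfl, sumSqA_eq_sumSqB, alt_base n w (by omega)]
  | succ k ih =>
    intro n w hk hpre
    have hn : 0 < n := by omega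
    have hne : w ≠ [] := fun h => absurd (hpre h) (by omega)
    obtain ⟨mx, hmx⟩ : ∃ mx, PySem.List.max? w (fun y => y) = some mx := by
      cases h : PySem.List.max? w (fun y => y) with
      | none => exact absurd ((PySem.List.max?_eq_none_iff w _).1 h) hne
      | some mx => exact ⟨mx, rfl⟩
    rw [solLoopA, hmx]
    dsimp only
    by_cases hmxp : 0 < mx
    · rw [if_pos hmxp]
      have hmem : mx ∈ w := PySem.List.max?_mem hmx
      obtain ⟨idx, hidx?⟩ : ∃ idx, PySem.List.index? w mx = some idx := by
        cases h : PySem.List.index? w mx with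
        | none => rw [PySem.List.index?_eq_none_iff] at h; exact absurd hmem h
        | some idx => exact ⟨idx, rfl⟩
      simp only [hidx?, Option.getD_some]
      have hlen : (w.modify idx (· - 1)) ≠ [] := by
        have : (w.modify idx (· - 1)).length = w.length := by simp
        intro h; rw [h] at this; simp at this; exact hne (List.eq_nil_of_length_eq_zero this.symm)
      rw [ih (n - 1) (w.modify idx (· - 1)) (by omega) (fun h => absurd h hlen)]
      exact (alt_step hn hmx hmxp hidx?).symm
    · rw [if_neg hmxp]
      have hmax : ∀ y ∈ w, y ≤ mx := PySem.List.max?_isMax hmx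
      rw [sumSqA_eq_sumSqB, alt_base n w ?_]
      rw [posSumB_eq_cost0, cost_eq_zero_of_le (fun x hx => by have := hmax x hx; omega)]
      omega

theorem main_eq (n : Int) (w : List Int) (hpre : w = [] → n ≤ 0) :
    solution n w = solution_alt n w := loop_eq n.toNat n w rfl hpre

-- ===== VERDICT (by name: the statement is the Claim_ definition above) =====
theorem solution_spec : Claim_equal_solution := by
  unfold Claim_equal_solution Spec_solution
  intro n works _ hpre
  exact main_eq n works hpre
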